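-- pv_equiv track=rewrite | github.com/bvhungit-crypto/ai-video-pipeline-TextToPrompt | core/auto_fix_engine.py | _ensure_required_components
-- ===== SOURCE A (Python) =====
-- def _ensure_required_components(sentences: list[str]) -> list[str]:
--     has_duration = any(s.lower().startswith("duration:") for s in sentences)
--     has_environment = any(
--         any(w in s.lower() for w in ("room", "space", "hallway", "street", "office", "factory"))
--         for s in sentences
--     )
--     has_objects = any(
--         any(w in s.lower() for w in ("desk", "paper", "table", "shelf", "chair", "window", "folder"))
--         for s in sentences
--     )
--     has_light = any(any(w in s.lower() for w in ("light", "shadow", "reflection")) for s in sentences)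
--     has_motion = any(
--         any(w in s.lower() for w in ("moves", "drift", "shifts", "settles", "flicker", "sways"))
--         for s in sentences
--     )
--
--     output = list(sentences)
--     if not has_environment:
--         output.append("Office room space remains visible with clear depth from front to back.")
--     if not has_objects:
--         output.append("Wood desk, paper stack, and shelf labels are visible in frame.")
--     if not has_light:
--         output.append("Light falls unevenly across surfaces with softer shadow near the edges.")
--     if not has_motion:
--         output.append("A paper corner shifts slightly near the front edge of the desk.")
--     if not has_duration:
--         output.append("Duration: 6 seconds")
--     return output
-- ===== SOURCE B (Python) =====
-- def _ensure_required_components(sentences: list[str]) -> list[str]: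
--     env = obj = light = motion = dur = False
--     for s in sentences:
--         if env and obj and light and motion and dur:
--             break
--         low = s.lower()
--         dur = dur or low.startswith("duration:")
--         env = env or any(w in low for w in ("room", "space", "hallway", "street", "office", "factory"))
--         obj = obj or any(w in low for w in ("desk", "paper", "table", "shelf", "chair", "window", "folder"))
--         light = light or any(w in low for w in ("light", "shadow", "reflection"))
--         motion = motion or any(w in low for w in ("moves", "drift", "shifts", "settles", "flicker", "sways"))
--     output = list(sentences)
--     if not env:
--         output.append("Office room space remains visible with clear depth from front to back.")
--     if not obj:
--         output.append("Wood desk, paper stack, and shelf labels are visible in frame.")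
--     if not light:
--         output.append("Light falls unevenly across surfaces with softer shadow near the edges.")
--     if not motion:
--         output.append("A paper corner shifts slightly near the front edge of the desk.")
--     if not dur:
--         output.append("Duration: 6 seconds")
--     return output
-- ===== Notes on version B (the rewrite author's own statement) =====
-- stated objective: alternative
-- what changed: Replaces A's five independent full scans of the sentence list by one single pass that lowercases each sentence once, OR-accumulates five flags, and breaks early once all components are found; defaults are then appended in the same order.
import Mathlib
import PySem

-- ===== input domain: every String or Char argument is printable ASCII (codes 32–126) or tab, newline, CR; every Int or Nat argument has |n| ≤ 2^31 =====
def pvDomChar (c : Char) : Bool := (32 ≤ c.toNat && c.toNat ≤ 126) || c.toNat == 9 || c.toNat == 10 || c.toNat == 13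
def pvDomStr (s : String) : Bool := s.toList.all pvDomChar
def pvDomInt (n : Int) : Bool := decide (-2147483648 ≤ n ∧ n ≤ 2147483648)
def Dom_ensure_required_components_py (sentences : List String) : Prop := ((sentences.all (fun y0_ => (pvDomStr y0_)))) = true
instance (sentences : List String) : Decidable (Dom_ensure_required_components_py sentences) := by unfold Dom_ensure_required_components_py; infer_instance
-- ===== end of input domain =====

-- B replaces A's five independent scans by one single pass with five OR-accumulated flags
-- and an early break; same return value, same append order (objective: alternative).

-- ===== PORT A =====
def ensure_required_components_py (sentences : List String) : List String :=
  let has_duration := sentences.any (fun s => PySem.Str.startswith (PySem.Str.lower s) "duration:")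
  let has_environment := sentences.any (fun s =>
    ["room", "space", "hallway", "street", "office", "factory"].any
      (fun w => PySem.Str.isIn w (PySem.Str.lower s)))
  let has_objects := sentences.any (fun s =>
    ["desk", "paper", "table", "shelf", "chair", "window", "folder"].any
      (fun w => PySem.Str.isIn w (PySem.Str.lower s)))
  let has_light := sentences.any (fun s =>
    ["light", "shadow", "reflection"].any (fun w => PySem.Str.isIn w (PySem.Str.lower s)))
  let has_motion := sentences.any (fun s =>
    ["moves", "drift", "shifts", "settles", "flicker", "sways"].any
      (fun w => PySem.Str.isIn w (PySem.Str.lower s)))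
  let output := sentences
  let output := if !has_environment then
    output ++ ["Office room space remains visible with clear depth from front to back."] else output
  let output := if !has_objects then
    output ++ ["Wood desk, paper stack, and shelf labels are visible in frame."] else output
  let output := if !has_light then
    output ++ ["Light falls unevenly across surfaces with softer shadow near the edges."] else output
  let output := if !has_motion then
    output ++ ["A paper corner shifts slightly near the front edge of the desk."] else output
  let output := if !has_duration then output ++ ["Duration: 6 seconds"] else output
  output

-- ===== PORT B =====
-- single pass: per sentence one lowercase, OR the five flags, early break when all true
def pvScan : List String → Bool → Bool → Bool → Bool → Bool → Bool × Bool × Bool × Bool × Bool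
  | [], env, obj, light, motion, dur => (env, obj, light, motion, dur)
  | s :: rest, env, obj, light, motion, dur =>
    if env && obj && light && motion && dur then (env, obj, light, motion, dur)
    else
      let low := PySem.Str.lower s
      pvScan rest
        (env || ["room", "space", "hallway", "street", "office", "factory"].any
          (fun w => PySem.Str.isIn w low))
        (obj || ["desk", "paper", "table", "shelf", "chair", "window", "folder"].any
          (fun w => PySem.Str.isIn w low))
        (light || ["light", "shadow", "reflection"].any (fun w => PySem.Str.isIn w low))
        (motion || ["moves", "drift", "shifts", "settles", "flicker", "sways"].any
          (fun w => PySem.Str.isIn w low))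
        (dur || PySem.Str.startswith low "duration:")

def ensure_required_components_py_alt (sentences : List String) : List String :=
  let flags := pvScan sentences false false false false false
  let output := sentences
  let output := if !flags.1 then
    output ++ ["Office room space remains visible with clear depth from front to back."] else output
  let output := if !flags.2.1 then
    output ++ ["Wood desk, paper stack, and shelf labels are visible in frame."] else output
  let output := if !flags.2.2.1 then
    output ++ ["Light falls unevenly across surfaces with softer shadow near the edges."] else output
  let output := if !flags.2.2.2.1 then
    output ++ ["A paper corner shifts slightly near the front edge of the desk."] else output
  let output := if !flags.2.2.2.2 then output ++ ["Duration: 6 seconds"] else output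
  output

-- ===== PRECONDITION & SPEC =====
def Spec_ensure_required_components_py (sentences : List String) (out : List String) : Prop := out = ensure_required_components_py_alt sentences
instance (sentences : List String) (out : List String) : Decidable (Spec_ensure_required_components_py sentences out) := by unfold Spec_ensure_required_components_py; infer_instance

-- ===== CLAIM (what is proved, stated in full; the proofs are below) =====
def Claim_equal_ensure_required_components_py : Prop := ∀ (sentences : List String), Dom_ensure_required_components_py sentences → Spec_ensure_required_components_py sentences (ensure_required_components_py sentences)

-- ===== LEMMAS AND PROOFS =====

-- the single-pass scan computes exactly the five OR-ed 'any' queries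
theorem pvScan_eq (sentences : List String) (env obj light motion dur : Bool) :
    pvScan sentences env obj light motion dur =
      (env || sentences.any (fun s =>
        ["room", "space", "hallway", "street", "office", "factory"].any
          (fun w => PySem.Str.isIn w (PySem.Str.lower s))),
       obj || sentences.any (fun s =>
        ["desk", "paper", "table", "shelf", "chair", "window", "folder"].any
          (fun w => PySem.Str.isIn w (PySem.Str.lower s))),
       light || sentences.any (fun s =>
        ["light", "shadow", "reflection"].any (fun w => PySem.Str.isIn w (PySem.Str.lower s))),
       motion || sentences.any (fun s =>
        ["moves", "drift", "shifts", "settles", "flicker", "sways"].any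
          (fun w => PySem.Str.isIn w (PySem.Str.lower s))),
       dur || sentences.any (fun s => PySem.Str.startswith (PySem.Str.lower s) "duration:")) := by
  induction sentences generalizing env obj light motion dur with
  | nil => simp [pvScan]
  | cons s rest ih =>
    simp only [pvScan]
    split
    · rename_i h
      simp only [Bool.and_eq_true] at h
      obtain ⟨⟨⟨⟨he, ho⟩, hl⟩, hm⟩, hd⟩ := h
      simp [he, ho, hl, hm, hd]
    · rw [ih]
      simp [Bool.or_assoc]

-- ===== VERDICT (by name: the statement is the Claim_ definition above) =====
theorem ensure_required_components_py_spec : Claim_equal_ensure_required_components_py := by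
  intro sentences _
  unfold Spec_ensure_required_components_py ensure_required_components_py
    ensure_required_components_py_alt
  rw [pvScan_eq]
  simp
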